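-- pv_equiv track=rewrite | github.com/davidar/oeisdata | verified/prog/Python/A003/A003634b.py | A003634
-- ===== SOURCE A (Python) =====
-- from itertools import count, combinations_with_replacement
--
-- def A003634(n):
--     for l in count(1):
--         if 9*l*n < 10**(l-1): return 0
--         c = 10**l
--         for d in combinations_with_replacement(range(10),l):
--             if sorted(str(a:=sum(d)*n)) == [str(e) for e in d] and a>0:
--                 c = min(c,a)
--         if c < 10**l:
--             return c # _Chai Wah Wu_, May 09 2023
-- ===== SOURCE B (Python) =====
-- def A003634(n):
--     # smallest a > 0 with a == n * digitsum(a): scan candidate digit sums s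
--     # ascending and test a = n*s arithmetically, instead of enumerating digit
--     # multisets per length as A does.
--     if n <= 0:
--         return 0
--     l = 1
--     while 9 * l * n >= 10 ** (l - 1):
--         l += 1
--     # any solution has fewer than l digits, hence digit sum at most 9*(l-1)
--     for s in range(1, 9 * (l - 1) + 1):
--         a = n * s
--         t, x = 0, a
--         while x > 0:
--             t += x % 10
--             x //= 10
--         if t == s:
--             return a
--     return 0
-- ===== Notes on version B (the rewrite author's own statement) =====
-- stated objective: faster
-- what changed: Instead of enumerating all C(l+9,9) nondecreasing digit multisets per length and comparing sorted string representations, B scans the candidate digit sums s = 1,2,... ascending, testing a = n*s with an arithmetic digit-sum loop (mod/div by 10); the first hit is the smallest solution, and A's own length bound gives the 0 case.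
import Mathlib
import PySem

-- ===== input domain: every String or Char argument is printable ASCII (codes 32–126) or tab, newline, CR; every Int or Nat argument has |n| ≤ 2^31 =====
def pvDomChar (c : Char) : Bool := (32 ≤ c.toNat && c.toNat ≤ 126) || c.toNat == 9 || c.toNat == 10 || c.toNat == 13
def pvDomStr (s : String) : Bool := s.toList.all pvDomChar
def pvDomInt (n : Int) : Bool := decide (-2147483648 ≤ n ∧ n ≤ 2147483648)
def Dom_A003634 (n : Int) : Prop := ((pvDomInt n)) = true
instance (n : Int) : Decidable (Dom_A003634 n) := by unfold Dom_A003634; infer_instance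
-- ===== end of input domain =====

-- B replaces A's per-length enumeration of all nondecreasing digit multisets (with a
-- sorted-string comparison) by an ascending scan of candidate digit sums s, testing
-- a = n*s with an arithmetic mod/div-by-10 digit-sum loop (faster).

-- termination helper for the search loops of both ports (cited in decreasing_by):
-- l*l ≤ 10^(l-1) for l ≥ 1, hence the loop condition bounds l by 9*n
theorem pv_sq_le : ∀ l : Nat, 1 ≤ l → l * l ≤ 10 ^ (l - 1)
  | 0, h => by omega
  | 1, _ => by norm_num
  | (m + 2), _ => by
    have ih := pv_sq_le (m + 1) (by omega)
    have hp : (10:Nat) ^ (m + 2 - 1) = 10 * 10 ^ (m + 1 - 1) := by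
      have he : m + 2 - 1 = (m + 1 - 1) + 1 := by omega
      rw [he, pow_succ, Nat.mul_comm]
    rw [hp]
    nlinarith [ih]

theorem pv_len_bound (n : Int) (l : Nat) (h : (10:Int) ^ (l - 1) ≤ 9 * (l:Int) * n) :
    l ≤ 9 * n.toNat := by
  rcases Nat.eq_zero_or_pos l with hl | hl
  · subst hl; simp at h
  · have hn : 1 ≤ n := by
      by_contra hn
      push Not at hn
      have h1 : (0:Int) < 10 ^ (l - 1) := by positivity
      have h2 : 9 * (l:Int) * n ≤ 0 := by
        have : (0:Int) ≤ 9 * (l:Int) := by positivity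
        exact mul_nonpos_of_nonneg_of_nonpos this (by omega)
      omega
    have hsq : ((l:Int)) * l ≤ 10 ^ (l - 1) := by
      have := pv_sq_le l hl
      have h2 : ((l * l : Nat) : Int) ≤ ((10 ^ (l - 1) : Nat) : Int) := by exact_mod_cast this
      push_cast at h2
      exact h2
    have h3 : ((l:Int)) * l ≤ 9 * (l:Int) * n := le_trans hsq h
    have hlpos : (0:Int) < (l:Int) := by exact_mod_cast hl
    have h4 : (l:Int) ≤ 9 * n := by nlinarith
    have h5 : l ≤ (9 * n).toNat := by omega
    omega

-- ===== PORT A =====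
-- combinations_with_replacement(range(10), l): nondecreasing tuples, first entry ≥ lo
def pvCwr : Nat → Nat → List (List Nat)
  | _, 0 => [[]]
  | lo, l + 1 =>
      (List.range' lo (10 - lo)).flatMap (fun d => (pvCwr d l).map (fun t => d :: t))

-- the inner 'for d in combinations_with_replacement' loop, accumulating c = min(c, a)
-- (str(e) for a single digit e is Nat.digitChar e; sorted(str(a)) sorts the chars)
def pvInnerA (n : Int) (l : Nat) : Int :=
  (pvCwr 0 l).foldl (fun c d =>
    let a : Int := ((d.foldl (fun s e => s + e) 0 : Nat) : Int) * n
    if PySem.List.sorted (PySem.Int.toChars a) (fun x => x) false = d.map Nat.digitChar ∧ 0 < a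
    then min c a else c) (10 ^ l)

-- the outer 'for l in count(1)' loop
def pvLoopA (n : Int) (l : Nat) : Int :=
  if 9 * (l:Int) * n < 10 ^ (l - 1) then 0
  else
    let c := pvInnerA n l
    if c < 10 ^ l then c else pvLoopA n (l + 1)
termination_by 9 * n.toNat + 2 - l
decreasing_by
  rename_i hcond _hc
  have := pv_len_bound n l (not_lt.mp hcond)
  omega

def A003634 (n : Int) : Int := pvLoopA n 1

-- ===== PORT B =====
-- Source B's inner 'while x > 0: t += x % 10; x //= 10' (arithmetic digit sum)
def pvDigitLoop (t x : Int) : Int :=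
  if 0 < x then pvDigitLoop (t + PySem.Int.mod x 10) (PySem.Int.floordiv x 10) else t
termination_by x.toNat
decreasing_by
  rename_i hx
  rw [PySem.Int.floordiv_eq_ediv_of_pos (by norm_num)]
  omega

-- Source B's 'while 9*l*n >= 10**(l-1): l += 1' starting from l
def pvFindL (n : Int) (l : Nat) : Nat :=
  if 9 * (l:Int) * n < 10 ^ (l - 1) then l else pvFindL n (l + 1)
termination_by 9 * n.toNat + 2 - l
decreasing_by
  rename_i hcond
  have := pv_len_bound n l (not_lt.mp hcond)
  omega

def A003634_alt (n : Int) : Int :=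
  if n ≤ 0 then 0
  else
    match (PySem.List.pyRange 1 (9 * ((pvFindL n 1 : Int) - 1) + 1) 1).find?
        (fun s => pvDigitLoop 0 (n * s) == s) with
    | some s => n * s
    | none => 0

-- ===== PRECONDITION & SPEC =====
def Spec_A003634 (n : Int) (out : Int) : Prop := out = A003634_alt n
instance (n : Int) (out : Int) : Decidable (Spec_A003634 n out) := by unfold Spec_A003634; infer_instance

-- ===== CLAIM (what is proved, stated in full; the proofs are below) =====
def Claim_equal_A003634 : Prop := ∀ (n : Int), Dom_A003634 n → Spec_A003634 n (A003634 n)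

-- ===== LEMMAS AND PROOFS =====

-- digit-sum of the characters, as A's comparison sees it
def pvCsum (cs : List Char) : Int := cs.foldl (fun s c => s + ((c.toNat : Int) - 48)) 0

def pvDS (a : Int) : Int := pvCsum (PySem.Int.toChars a)

def pvLen (a : Int) : Nat := (Nat.toDigits 10 a.toNat).length

-- 'a is a solution for n': the common mathematical content of both programs
def pvSol (n a : Int) : Prop := 0 < a ∧ a = n * pvDS a

-- Nat.toDigits vs Nat.digits
theorem pv_toDigitsCore_eq : ∀ (f n : Nat) (l : List Char), 0 < n → n ≤ f →
    Nat.toDigitsCore 10 f n l = ((Nat.digits 10 n).map Nat.digitChar).reverse ++ l := by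
  intro f
  induction f with
  | zero => intro n l h hf; omega
  | succ f ih =>
    intro n l h hf
    rw [Nat.digits_def' (by norm_num : 1 < 10) h]
    simp only [Nat.toDigitsCore]
    by_cases h0 : n / 10 = 0
    · rw [if_pos h0, h0]
      simp
    · rw [if_neg h0]
      have hlt : n / 10 < n := Nat.div_lt_self h (by norm_num)
      rw [ih (n / 10) ((n % 10).digitChar :: l) (Nat.pos_of_ne_zero h0) (by omega)]
      simp

theorem pv_toDigits_eq (n : Nat) (h : 0 < n) :
    Nat.toDigits 10 n = ((Nat.digits 10 n).map Nat.digitChar).reverse := by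
  have := pv_toDigitsCore_eq (n + 1) n [] h (by omega)
  simpa [Nat.toDigits] using this

theorem pv_toChars_pos (a : Int) (h : 0 < a) :
    PySem.Int.toChars a = Nat.toDigits 10 a.toNat := by
  simp [PySem.Int.toChars, not_lt.mpr (le_of_lt h)]

-- every character of str(a), a > 0, is a digit character
theorem pv_chars_digit (a : Int) (h : 0 < a) (c : Char) (hc : c ∈ PySem.Int.toChars a) :
    ∃ e, e < 10 ∧ c = Nat.digitChar e := by
  rw [pv_toChars_pos a h, pv_toDigits_eq a.toNat (by omega)] at hc
  simp only [List.mem_reverse, List.mem_map] at hc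
  obtain ⟨e, he, rfl⟩ := hc
  exact ⟨e, Nat.digits_lt_base (by norm_num) he, rfl⟩

theorem pv_digitChar_toNat (e : Nat) (h : e < 10) : (Nat.digitChar e).toNat = 48 + e := by
  interval_cases e <;> rfl

theorem pv_len_pos (a : Int) (h : 0 < a) : 1 ≤ pvLen a := by
  unfold pvLen
  rw [pv_toDigits_eq a.toNat (by omega)]
  have hne : Nat.digits 10 a.toNat ≠ [] := Nat.digits_ne_nil_iff_ne_zero.mpr (by omega)
  simp only [List.length_reverse, List.length_map]
  exact Nat.one_le_iff_ne_zero.mpr (fun h0 => hne (List.eq_nil_of_length_eq_zero h0))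

theorem pv_lower (a : Int) (h : 0 < a) : (10:Int) ^ (pvLen a - 1) ≤ a := by
  have hn0 : a.toNat ≠ 0 := by omega
  have hlen : pvLen a = (Nat.digits 10 a.toNat).length := by
    unfold pvLen; rw [pv_toDigits_eq a.toNat (by omega)]; simp
  have hl : (Nat.digits 10 a.toNat).length = Nat.log 10 a.toNat + 1 :=
    Nat.length_digits 10 a.toNat (by norm_num) hn0
  have hp : (10:Nat) ^ (Nat.log 10 a.toNat) ≤ a.toNat := Nat.pow_log_le_self 10 hn0
  have : pvLen a - 1 = Nat.log 10 a.toNat := by omega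
  rw [this]
  have := (Nat.cast_le (α := Int)).mpr hp
  push_cast at this
  omega

theorem pv_upper (a : Int) (h : 0 < a) : a < (10:Int) ^ (pvLen a) := by
  have hlen : pvLen a = (Nat.digits 10 a.toNat).length := by
    unfold pvLen; rw [pv_toDigits_eq a.toNat (by omega)]; simp
  have hp : a.toNat < 10 ^ (Nat.digits 10 a.toNat).length :=
    Nat.lt_base_pow_length_digits (by norm_num)
  rw [hlen]
  have := (Nat.cast_lt (α := Int)).mpr hp
  push_cast at this
  omega

theorem pv_foldl_add_init {α : Type} (f : α → Int) :
    ∀ (cs : List α) (init : Int),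
      cs.foldl (fun s c => s + f c) init = init + (cs.map f).sum := by
  intro cs
  induction cs with
  | nil => intro init; simp
  | cons c cs ih => intro init; simp [ih]; ring

theorem pv_csum_eq_sum (cs : List Char) :
    pvCsum cs = (cs.map (fun c => ((c.toNat : Int) - 48))).sum := by
  unfold pvCsum
  rw [pv_foldl_add_init]
  ring

theorem pv_csum_perm (cs ds : List Char) (h : cs.Perm ds) : pvCsum cs = pvCsum ds := by
  rw [pv_csum_eq_sum, pv_csum_eq_sum]
  exact (h.map _).sum_eq

theorem pv_csum_digits (d : List Nat) (h : ∀ e ∈ d, e ≤ 9) :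
    pvCsum (d.map Nat.digitChar) = (d.sum : Int) := by
  rw [pv_csum_eq_sum, List.map_map]
  induction d with
  | nil => simp
  | cons e d ih =>
    have he : ((Nat.digitChar e).toNat : Int) - 48 = (e : Int) := by
      rw [pv_digitChar_toNat e (by have := h e (List.mem_cons_self ..); omega)]
      push_cast; ring
    simp only [List.map_cons, List.sum_cons, Function.comp_apply, he,
      ih (fun x hx => h x (List.mem_cons_of_mem _ hx))]
    push_cast; ring

theorem pv_digits_sum (a : Int) (h : 0 < a) :
    pvDS a = ((Nat.digits 10 a.toNat).sum : Int) := by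
  unfold pvDS
  rw [pv_toChars_pos a h, pv_toDigits_eq a.toNat (by omega)]
  rw [pv_csum_perm _ ((Nat.digits 10 a.toNat).map Nat.digitChar)
      (by exact List.reverse_perm _)]
  exact pv_csum_digits _ (fun e he => by
    have := Nat.digits_lt_base (by norm_num : 1 < 10) he; omega)

-- the arithmetic digit-sum loop of B computes the Nat.digits sum
theorem pv_digitLoop_eq : ∀ (m : Nat) (x t : Int), x.toNat = m → 0 ≤ x →
    pvDigitLoop t x = t + ((Nat.digits 10 x.toNat).sum : Int) := by
  intro m
  induction m using Nat.strong_induction_on with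
  | _ m ih =>
    intro x t hm hx
    rw [pvDigitLoop]
    by_cases hpos : 0 < x
    · rw [if_pos hpos]
      have hd : PySem.Int.floordiv x 10 = x / 10 :=
        PySem.Int.floordiv_eq_ediv_of_pos (by norm_num)
      have hmm : PySem.Int.mod x 10 = x % 10 :=
        PySem.Int.mod_eq_emod_of_pos (by norm_num)
      have hq : (x / 10).toNat = x.toNat / 10 := by omega
      have hr : x % 10 = ((x.toNat % 10 : Nat) : Int) := by omega
      rw [hd, hmm]
      rw [ih (x / 10).toNat (by omega) (x / 10) (t + x % 10) rfl (by omega)]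
      have hdig : Nat.digits 10 x.toNat = x.toNat % 10 :: Nat.digits 10 (x.toNat / 10) :=
        Nat.digits_def' (by norm_num : 1 < 10) (by omega)
      rw [hq, hr]
      conv_rhs => rw [hdig]
      simp only [List.sum_cons]
      push_cast
      ring
    · rw [if_neg hpos]
      have : x.toNat = 0 := by omega
      rw [this]
      simp
theorem pv_digitLoop_pvDS (a : Int) (h : 0 < a) : pvDigitLoop 0 a = pvDS a := by
  rw [pv_digitLoop_eq a.toNat a 0 rfl (by omega), pv_digits_sum a h]
  ring

theorem pv_ds_nonneg (a : Int) (h : 0 < a) : 0 ≤ pvDS a := by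
  rw [pv_digits_sum a h]; positivity

theorem pv_ds_le (a : Int) (h : 0 < a) : pvDS a ≤ 9 * (pvLen a : Int) := by
  rw [pv_digits_sum a h]
  have hlen : pvLen a = (Nat.digits 10 a.toNat).length := by
    unfold pvLen; rw [pv_toDigits_eq a.toNat (by omega)]; simp
  have hb : (Nat.digits 10 a.toNat).sum ≤ (Nat.digits 10 a.toNat).length * 9 := by
    have := List.sum_le_card_nsmul (Nat.digits 10 a.toNat) 9 (fun x hx => by
      have := Nat.digits_lt_base (by norm_num : 1 < 10) hx; omega)
    simpa [smul_eq_mul] using this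
  rw [hlen]
  have hc := (Nat.cast_le (α := Int)).mpr hb
  push_cast at hc
  omega

-- solutions force n ≥ 1 and digit sum ≥ 1
theorem pv_sol_n_pos (n a : Int) (h : pvSol n a) : 1 ≤ n := by
  obtain ⟨hpos, heq⟩ := h
  by_contra hn
  push Not at hn
  have hds : 0 ≤ pvDS a := pv_ds_nonneg a hpos
  nlinarith

theorem pv_sol_ds_pos (n a : Int) (h : pvSol n a) : 1 ≤ pvDS a := by
  obtain ⟨hpos, heq⟩ := h
  have hds : 0 ≤ pvDS a := pv_ds_nonneg a hpos
  rcases eq_or_lt_of_le hds with h0 | h0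
  · exfalso; rw [← h0] at heq; simp at heq; omega
  · omega

-- the loop condition is monotone in l, false at the length of any solution
theorem pv_cond_step (n : Int) (l : Nat) (hl : 1 ≤ l)
    (h : 9 * (l:Int) * n < 10 ^ (l - 1)) : 9 * ((l+1:Nat):Int) * n < 10 ^ l := by
  have hp : (10:Int) ^ l = 10 * 10 ^ (l - 1) := by
    have he : l = (l - 1) + 1 := by omega
    calc (10:Int) ^ l = 10 ^ ((l - 1) + 1) := by rw [← he]
    _ = 10 * 10 ^ (l - 1) := by rw [pow_succ]; ring
  rw [hp]
  by_cases hn : 0 ≤ n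
  · have hll : ((l:Int)) + 1 ≤ 2 * l := by
      have : (1:Int) ≤ (l:Int) := by exact_mod_cast hl
      omega
    push_cast
    nlinarith
  · push Not at hn
    have h1 : 9 * ((l+1:Nat):Int) * n < 0 := by
      have : (0:Int) < 9 * ((l+1:Nat):Int) := by positivity
      exact mul_neg_of_pos_of_neg this hn
    have h2 : (0:Int) < 10 * 10 ^ (l - 1) := by positivity
    omega

theorem pv_cond_mono (n : Int) (l m : Nat) (hl : 1 ≤ l) (hlm : l ≤ m)
    (h : 9 * (l:Int) * n < 10 ^ (l - 1)) : 9 * (m:Int) * n < 10 ^ (m - 1) := by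
  induction m with
  | zero => omega
  | succ k ih =>
    rcases Nat.lt_or_ge l (k + 1) with hlt | hge
    · have hk : 1 ≤ k := by omega
      have := pv_cond_step n k hk (ih (by omega))
      simpa using this
    · have : l = k + 1 := by omega
      subst this
      exact h

theorem pv_sol_not_cond (n a : Int) (h : pvSol n a) :
    ¬ (9 * ((pvLen a : Nat):Int) * n < 10 ^ (pvLen a - 1)) := by
  obtain ⟨hpos, heq⟩ := h
  have hds := pv_ds_le a hpos
  have hlow := pv_lower a hpos
  have hn := pv_sol_n_pos n a ⟨hpos, heq⟩
  have : a ≤ 9 * ((pvLen a : Nat):Int) * n := by nlinarith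
  omega

-- membership in the combinations generator
theorem pv_mem_cwr : ∀ (l : Nat) (lo : Nat) (d : List Nat),
    d ∈ pvCwr lo l ↔ d.length = l ∧ d.Pairwise (· ≤ ·) ∧ ∀ e ∈ d, lo ≤ e ∧ e ≤ 9 := by
  intro l
  induction l with
  | zero =>
    intro lo d
    simp only [pvCwr, List.mem_singleton]
    constructor
    · rintro rfl; simp
    · rintro ⟨hlen, -, -⟩
      exact List.eq_nil_of_length_eq_zero hlen
  | succ l ih =>
    intro lo d
    simp only [pvCwr, List.mem_flatMap, List.mem_map, List.mem_range'_1]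
    constructor
    · rintro ⟨e, ⟨he1, he2⟩, t, ht, rfl⟩
      obtain ⟨hlen, hpw, hbd⟩ := (ih e t).mp ht
      refine ⟨by simp [hlen], ?_, ?_⟩
      · exact List.pairwise_cons.mpr ⟨fun x hx => ((hbd x hx).1), hpw⟩
      · rintro x hx
        rcases List.mem_cons.mp hx with rfl | hx
        · omega
        · have := hbd x hx; omega
    · rintro ⟨hlen, hpw, hbd⟩
      cases d with
      | nil => simp at hlen
      | cons e t =>
        obtain ⟨hhead, hpwt⟩ := List.pairwise_cons.mp hpw
        have hbde := hbd e (List.mem_cons_self ..)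
        refine ⟨e, ⟨hbde.1, by omega⟩, t, ?_, rfl⟩
        refine (ih e t).mpr ⟨by simpa using hlen, hpwt, ?_⟩
        intro x hx
        exact ⟨hhead x hx, (hbd x (List.mem_cons_of_mem _ hx)).2⟩

-- foldl-min machinery
theorem pv_foldl_min_le {α : Type} (P : α → Prop) [DecidablePred P] (f : α → Int) :
    ∀ (xs : List α) (c0 : Int),
      xs.foldl (fun c d => if P d then min c (f d) else c) c0 ≤ c0 := by
  intro xs
  induction xs with
  | nil => intro c0; simp
  | cons x xs ih =>
    intro c0
    simp only [List.foldl_cons]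
    by_cases hx : P x
    · rw [if_pos hx]
      exact le_trans (ih _) (min_le_left _ _)
    · rw [if_neg hx]; exact ih c0

theorem pv_foldl_min_le_mem {α : Type} (P : α → Prop) [DecidablePred P] (f : α → Int) :
    ∀ (xs : List α) (c0 : Int) (d : α), d ∈ xs → P d →
      xs.foldl (fun c d => if P d then min c (f d) else c) c0 ≤ f d := by
  intro xs
  induction xs with
  | nil => intro c0 d hd; simp at hd
  | cons x xs ih =>
    intro c0 d hd hP
    simp only [List.foldl_cons]
    rcases List.mem_cons.mp hd with rfl | hd
    · rw [if_pos hP]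
      exact le_trans (pv_foldl_min_le P f xs _) (min_le_right _ _)
    · by_cases hx : P x
      · rw [if_pos hx]; exact ih _ d hd hP
      · rw [if_neg hx]; exact ih _ d hd hP

theorem pv_foldl_min_lb {α : Type} (P : α → Prop) [DecidablePred P] (f : α → Int) (b : Int) :
    ∀ (xs : List α) (c0 : Int), b ≤ c0 → (∀ d ∈ xs, P d → b ≤ f d) →
      b ≤ xs.foldl (fun c d => if P d then min c (f d) else c) c0 := by
  intro xs
  induction xs with
  | nil => intro c0 h1 _; simpa using h1
  | cons x xs ih =>
    intro c0 h1 h2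
    simp only [List.foldl_cons]
    by_cases hx : P x
    · rw [if_pos hx]
      exact ih _ (le_min h1 (h2 x (List.mem_cons_self ..) hx))
        (fun d hd => h2 d (List.mem_cons_of_mem _ hd))
    · rw [if_neg hx]
      exact ih _ h1 (fun d hd => h2 d (List.mem_cons_of_mem _ hd))

theorem pv_foldl_min_none {α : Type} (P : α → Prop) [DecidablePred P] (f : α → Int) :
    ∀ (xs : List α) (c0 : Int), (∀ d ∈ xs, ¬ P d) →
      xs.foldl (fun c d => if P d then min c (f d) else c) c0 = c0 := by
  intro xs
  induction xs with
  | nil => intro c0 _; simp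
  | cons x xs ih =>
    intro c0 h
    simp only [List.foldl_cons, if_neg (h x (List.mem_cons_self ..))]
    exact ih _ (fun d hd => h d (List.mem_cons_of_mem _ hd))

theorem pv_nat_foldl_add_init : ∀ (d : List Nat) (init : Nat),
    d.foldl (fun s e => s + e) init = init + d.sum := by
  intro d
  induction d with
  | nil => intro init; simp
  | cons e d ih => intro init; simp [ih]; omega

theorem pv_foldl_add (d : List Nat) : d.foldl (fun s e => s + e) 0 = d.sum := by
  simpa using pv_nat_foldl_add_init d 0

-- a passing tuple is a solution of length l (P1)
theorem pv_len_eq_chars (a : Int) (h : 0 < a) : pvLen a = (PySem.Int.toChars a).length := by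
  rw [pv_toChars_pos a h]; rfl

theorem pv_pass_sol (n : Int) (l : Nat) (d : List Nat) (hd : d ∈ pvCwr 0 l)
    (hpass : PySem.List.sorted (PySem.Int.toChars ((d.sum : Int) * n)) (fun x => x) false
        = d.map Nat.digitChar ∧ 0 < (d.sum : Int) * n) :
    pvSol n ((d.sum : Int) * n) ∧ pvLen ((d.sum : Int) * n) = l := by
  obtain ⟨hsort, hpos⟩ := hpass
  obtain ⟨hlen, hpw, hbd⟩ := (pv_mem_cwr l 0 d).mp hd
  set a : Int := (d.sum : Int) * n with ha
  have hperm : (PySem.List.sorted (PySem.Int.toChars a) (fun x => x) false).Perm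
      (PySem.Int.toChars a) := PySem.List.sorted_perm _ _ _
  have hds : pvDS a = (d.sum : Int) := by
    unfold pvDS
    rw [pv_csum_perm _ _ hperm.symm, hsort, pv_csum_digits d (fun e he => (hbd e he).2)]
  refine ⟨⟨hpos, by rw [hds]; ring⟩, ?_⟩
  rw [pv_len_eq_chars a hpos, ← hperm.length_eq, hsort, List.length_map, hlen]

-- the canonical tuple of a solution of length l passes (P2)
theorem pv_sol_pass (n a : Int) (l : Nat) (hs : pvSol n a) (hl : pvLen a = l) :
    ∃ d ∈ pvCwr 0 l, ((d.sum : Int) * n = a ∧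
      PySem.List.sorted (PySem.Int.toChars ((d.sum : Int) * n)) (fun x => x) false
        = d.map Nat.digitChar ∧ 0 < (d.sum : Int) * n) := by
  obtain ⟨hpos, heq⟩ := hs
  set cs := PySem.Int.toChars a with hcs
  set ss := PySem.List.sorted cs (fun x => x) false with hss
  have hperm : ss.Perm cs := PySem.List.sorted_perm _ _ _
  have hdig : ∀ c ∈ ss, ∃ e, e < 10 ∧ c = Nat.digitChar e := by
    intro c hc
    exact pv_chars_digit a hpos c (hperm.mem_iff.mp hc)
  set d : List Nat := ss.map (fun c => c.toNat - 48) with hd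
  have hmapback : d.map Nat.digitChar = ss := by
    rw [hd, List.map_map]
    have hpt : ∀ c ∈ ss, (Nat.digitChar ∘ fun c => c.toNat - 48) c = id c := by
      intro c hc
      obtain ⟨e, he, rfl⟩ := hdig c hc
      simp [Function.comp, pv_digitChar_toNat e he]
    rw [List.map_congr_left hpt, List.map_id]
  have hbd : ∀ e ∈ d, e ≤ 9 := by
    intro e he
    rw [hd] at he
    obtain ⟨c, hc, rfl⟩ := List.mem_map.mp he
    obtain ⟨e', he', rfl⟩ := hdig c hc
    rw [pv_digitChar_toNat e' he']
    omega
  have hsum : (d.sum : Int) = pvDS a := by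
    rw [← pv_csum_digits d hbd, hmapback, pv_csum_perm _ _ hperm]
    rfl
  have hval : (d.sum : Int) * n = a := by rw [hsum, mul_comm]; exact heq.symm
  refine ⟨d, ?_, hval, ?_, by rw [hval]; exact hpos⟩
  · refine (pv_mem_cwr l 0 d).mpr ⟨?_, ?_, fun e he => ⟨Nat.zero_le e, hbd e he⟩⟩
    · rw [hd, List.length_map, hperm.length_eq, ← pv_len_eq_chars a hpos, hl]
    · have hpws : ss.Pairwise (fun a b => a ≤ b) := PySem.List.sorted_pairwise cs _
      rw [hd]
      refine List.Pairwise.map _ ?_ hpws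
      intro c c' hcc
      have h1 : c.toNat ≤ c'.toNat := by
        rw [Char.le_def] at hcc
        exact hcc
      omega
  · rw [hval, ← hcs, ← hss, hmapback]

-- A-side loop characterizations
theorem pvInnerA_eq (n : Int) (l : Nat) : pvInnerA n l =
    (pvCwr 0 l).foldl (fun c d =>
      if PySem.List.sorted (PySem.Int.toChars ((d.sum : Int) * n)) (fun x => x) false
          = d.map Nat.digitChar ∧ 0 < (d.sum : Int) * n
      then min c ((d.sum : Int) * n) else c) (10 ^ l) := by
  unfold pvInnerA
  simp only [pv_foldl_add]

theorem pv_inner_none (n : Int) (l : Nat)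
    (hno : ∀ a, ¬ (pvSol n a ∧ pvLen a = l)) : pvInnerA n l = 10 ^ l := by
  rw [pvInnerA_eq]
  exact pv_foldl_min_none _ _ _ _
    (fun d hd hp => hno _ (pv_pass_sol n l d hd hp))

theorem pv_loopA_none (n : Int) (hno : ∀ a, ¬ pvSol n a) : ∀ l, pvLoopA n l = 0 := by
  intro l
  induction l using pvLoopA.induct n with
  | case1 l h => rw [pvLoopA, if_pos h]
  | case2 l h c hcl =>
    exfalso
    have hcl' : pvInnerA n l < 10 ^ l := hcl
    rw [pv_inner_none n l (fun a ha => hno a ha.1)] at hcl'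
    omega
  | case3 l h c hcl ih =>
    have hcl' : ¬ pvInnerA n l < 10 ^ l := hcl
    rw [pvLoopA, if_neg h]
    show (if pvInnerA n l < 10 ^ l then pvInnerA n l else pvLoopA n (l + 1)) = 0
    rw [if_neg hcl']
    exact ih

theorem pv_inner_least (n a0 : Int) (l : Nat) (hs : pvSol n a0) (hl0 : pvLen a0 = l)
    (hmin : ∀ a, pvSol n a → a0 ≤ a) : pvInnerA n l = a0 := by
  obtain ⟨d0, hd0, hval0, hpass0⟩ := pv_sol_pass n a0 l hs hl0
  have hle : pvInnerA n l ≤ (d0.sum : Int) * n := by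
    rw [pvInnerA_eq]
    exact pv_foldl_min_le_mem _ _ _ _ d0 hd0 hpass0
  rw [hval0] at hle
  have hge : a0 ≤ pvInnerA n l := by
    rw [pvInnerA_eq]
    refine pv_foldl_min_lb _ _ a0 _ _ ?_ ?_
    · have := pv_upper a0 hs.1
      rw [hl0] at this
      omega
    · intro d hd hp
      exact hmin _ (pv_pass_sol n l d hd hp).1
  omega

theorem pv_loopA_least (n a0 : Int) (hs : pvSol n a0) (hmin : ∀ a, pvSol n a → a0 ≤ a) :
    ∀ l, 1 ≤ l → (∀ a, pvSol n a → l ≤ pvLen a) → pvLoopA n l = a0 := by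
  intro l
  induction l using pvLoopA.induct n with
  | case1 l h =>
    intro hl hinv
    exfalso
    exact pv_sol_not_cond n a0 hs
      (pv_cond_mono n l (pvLen a0) hl (hinv a0 hs) h)
  | case2 l h c hcl =>
    have hc : pvInnerA n l < 10 ^ l := hcl
    intro hl hinv
    -- some length-l solution exists, else the inner minimum would be 10^l
    have hex : ∃ a, pvSol n a ∧ pvLen a = l := by
      by_contra hno
      push Not at hno
      rw [pv_inner_none n l (fun a ha => hno a ha.1 ha.2)] at hc
      omega
    obtain ⟨a1, ha1, hl1⟩ := hex
    have hlen0 : pvLen a0 = l := by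
      have h1 : l ≤ pvLen a0 := hinv a0 hs
      rcases Nat.eq_or_lt_of_le h1 with h2 | h2
      · omega
      · exfalso
        have hub : a1 < 10 ^ l := by
          have := pv_upper a1 ha1.1; rw [hl1] at this; exact this
        have hlb : (10:Int) ^ l ≤ a0 := by
          have := pv_lower a0 hs.1
          calc (10:Int) ^ l ≤ 10 ^ (pvLen a0 - 1) := by
                apply pow_le_pow_right₀ (by norm_num)
                omega
          _ ≤ a0 := this
        have := hmin a1 ha1
        omega
    rw [pvLoopA, if_neg h]
    show (if pvInnerA n l < 10 ^ l then pvInnerA n l else pvLoopA n (l + 1)) = a0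
    rw [if_pos hc]
    exact pv_inner_least n a0 l hs hlen0 hmin
  | case3 l h c hcl ih =>
    have hcl' : ¬ pvInnerA n l < 10 ^ l := hcl
    intro hl hinv
    rw [pvLoopA, if_neg h]
    show (if pvInnerA n l < 10 ^ l then pvInnerA n l else pvLoopA n (l + 1)) = a0
    rw [if_neg hcl']
    refine ih (by omega) ?_
    intro a ha
    have h1 : l ≤ pvLen a := hinv a ha
    rcases Nat.eq_or_lt_of_le h1 with h2 | h2
    · exfalso
      have hlen0 : pvLen a0 = l := by
        have h3 : l ≤ pvLen a0 := hinv a0 hs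
        have h4 : a0 ≤ a := hmin a ha
        rcases Nat.eq_or_lt_of_le h3 with h5 | h5
        · omega
        · exfalso
          have hub : a < 10 ^ l := by
            have := pv_upper a ha.1; rw [← h2] at this; exact this
          have hlb : (10:Int) ^ l ≤ a0 := by
            have hlow := pv_lower a0 hs.1
            calc (10:Int) ^ l ≤ 10 ^ (pvLen a0 - 1) := by
                  apply pow_le_pow_right₀ (by norm_num)
                  omega
            _ ≤ a0 := hlow
          omega
      apply hcl'
      rw [pv_inner_least n a0 l hs hlen0 hmin]
      have hupper := pv_upper a0 hs.1
      rw [hlen0] at hupper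
      exact hupper
    · omega

-- B-side characterizations
theorem pv_findL_cond (n : Int) : ∀ l, 9 * ((pvFindL n l : Nat):Int) * n < 10 ^ (pvFindL n l - 1) := by
  intro l
  induction l using pvFindL.induct n with
  | case1 l h => rw [pvFindL, if_pos h]; exact h
  | case2 l h ih => rw [pvFindL, if_neg h]; exact ih

theorem pv_findL_ge (n : Int) : ∀ l, l ≤ pvFindL n l := by
  intro l
  induction l using pvFindL.induct n with
  | case1 l h => rw [pvFindL, if_pos h]
  | case2 l h ih => rw [pvFindL, if_neg h]; omega

theorem pv_alt_none (n : Int) (hno : ∀ a, ¬ pvSol n a) : A003634_alt n = 0 := by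
  unfold A003634_alt
  by_cases hn : n ≤ 0
  · rw [if_pos hn]
  · rw [if_neg hn]
    have hfind : (PySem.List.pyRange 1 (9 * ((pvFindL n 1 : Int) - 1) + 1) 1).find?
        (fun s => pvDigitLoop 0 (n * s) == s) = none := by
      rw [List.find?_eq_none]
      intro s hsmem hpred
      have hs1 : 1 ≤ s := (PySem.List.mem_pyRange_one.mp hsmem).1
      have hapos : 0 < n * s := by nlinarith [show (1:Int) ≤ n by omega]
      have hseq : pvDS (n * s) = s := by
        rw [← pv_digitLoop_pvDS _ hapos]
        simpa using hpred
      apply hno (n * s)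
      exact ⟨hapos, by rw [hseq]⟩
    rw [hfind]

theorem pv_alt_least (n a0 : Int) (hs : pvSol n a0) (hmin : ∀ a, pvSol n a → a0 ≤ a) :
    A003634_alt n = a0 := by
  have hn := pv_sol_n_pos n a0 hs
  have hds1 := pv_sol_ds_pos n a0 hs
  unfold A003634_alt
  rw [if_neg (by omega : ¬ n ≤ 0)]
  set L0 := pvFindL n 1 with hL0
  set b : Int := 9 * ((L0 : Int) - 1) + 1 with hb
  set s0 : Int := pvDS a0 with hs0
  have hL1 : 1 ≤ L0 := pv_findL_ge n 1
  have hlenle : pvLen a0 ≤ L0 - 1 := by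
    by_contra hcon
    push Not at hcon
    exact pv_sol_not_cond n a0 hs
      (pv_cond_mono n L0 (pvLen a0) hL1 (by omega) (pv_findL_cond n 1))
  have hs0b : s0 < b := by
    have h1 := pv_ds_le a0 hs.1
    have h2 : ((pvLen a0 : Nat) : Int) ≤ (L0 : Int) - 1 := by
      have : ((pvLen a0 : Nat) : Int) ≤ ((L0 - 1 : Nat) : Int) := by exact_mod_cast hlenle
      omega
    rw [hb]
    nlinarith
  have ha0eq : n * s0 = a0 := hs.2.symm
  have hsplit : PySem.List.pyRange 1 b 1 =
      PySem.List.pyRange 1 s0 1 ++ PySem.List.pyRange s0 b 1 :=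
    PySem.List.pyRange_one_append 1 s0 b (by omega) (by omega)
  have hfail : ∀ s ∈ PySem.List.pyRange 1 s0 1,
      ¬ ((fun s => pvDigitLoop 0 (n * s) == s) s = true) := by
    intro s hsmem hpred
    obtain ⟨hs1, hs2⟩ := PySem.List.mem_pyRange_one.mp hsmem
    have hapos : 0 < n * s := by nlinarith
    have hseq : pvDS (n * s) = s := by
      rw [← pv_digitLoop_pvDS _ hapos]
      simpa using hpred
    have hsol : pvSol n (n * s) := ⟨hapos, by rw [hseq]⟩
    have hle := hmin _ hsol
    have hlt : n * s < n * s0 := mul_lt_mul_of_pos_left hs2 (by omega)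
    omega
  have hcons : PySem.List.pyRange s0 b 1 = s0 :: PySem.List.pyRange (s0 + 1) b 1 :=
    PySem.List.pyRange_one_cons (by omega)
  have hpred0 : (fun s => pvDigitLoop 0 (n * s) == s) s0 = true := by
    simp only [beq_iff_eq]
    rw [ha0eq, pv_digitLoop_pvDS a0 hs.1]
  rw [hsplit, List.find?_append, List.find?_eq_none.mpr hfail, Option.none_or, hcons]
  simp only [List.find?_cons, hpred0]
  exact ha0eq

-- ===== VERDICT (by name: the statement is the Claim_ definition above) =====
theorem A003634_spec : Claim_equal_A003634 := by
  intro n _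
  unfold Spec_A003634 A003634
  by_cases hex : ∃ a, pvSol n a
  · obtain ⟨a, ha⟩ := hex
    obtain ⟨a0, ha0, hmin⟩ := Int.exists_least_of_bdd (P := pvSol n)
      ⟨1, fun z hz => hz.1⟩ ⟨a, ha⟩
    rw [pv_loopA_least n a0 ha0 hmin 1 le_rfl
        (fun a ha => pv_len_pos a ha.1), pv_alt_least n a0 ha0 hmin]
  · push Not at hex
    rw [pv_loopA_none n hex 1, pv_alt_none n hex]
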